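-- pv_equiv track=rewrite | github.com/andresacg30/acme-employees | main.py | choose_pair
-- ===== SOURCE A (Python) =====
-- def choose_pair(combination: list, employees: dict):
--     """
--     Takes the pair of employees' combination, cleans the employees' dict with only the values of the
--     combination and returns a new dict.
--     :return: dict
--     """
--     combination = set(combination)  # Set for further intersection
--     new_employees = list(set(employees.keys()).intersection(combination))
--     new_employees_dict = dict()  # Empty dict to store new combination's values
--
--     # Search among the employees' dict those who match with the names in combination, and assign them to a new dict
--     for i, j in employees.items():
--         for k in new_employees:
--             if i == k:
--                 new_employees_dict[k] = j
--     return new_employees_dict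
-- ===== SOURCE B (Python) =====
-- def choose_pair(combination: list, employees: dict):
--     """
--     Takes the pair of employees' combination, cleans the employees' dict with only the values of the
--     combination and returns a new dict.
--     :return: dict
--     """
--     cset = set(combination)
--     return {k: v for k, v in employees.items() if k in cset}
-- ===== Notes on version B (the rewrite author's own statement) =====
-- stated objective: simpler
-- what changed: Replaces A's precomputed key-set intersection plus nested loop over it with a single-pass dict comprehension that filters employees.items() by membership in set(combination).
import Mathlib
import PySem

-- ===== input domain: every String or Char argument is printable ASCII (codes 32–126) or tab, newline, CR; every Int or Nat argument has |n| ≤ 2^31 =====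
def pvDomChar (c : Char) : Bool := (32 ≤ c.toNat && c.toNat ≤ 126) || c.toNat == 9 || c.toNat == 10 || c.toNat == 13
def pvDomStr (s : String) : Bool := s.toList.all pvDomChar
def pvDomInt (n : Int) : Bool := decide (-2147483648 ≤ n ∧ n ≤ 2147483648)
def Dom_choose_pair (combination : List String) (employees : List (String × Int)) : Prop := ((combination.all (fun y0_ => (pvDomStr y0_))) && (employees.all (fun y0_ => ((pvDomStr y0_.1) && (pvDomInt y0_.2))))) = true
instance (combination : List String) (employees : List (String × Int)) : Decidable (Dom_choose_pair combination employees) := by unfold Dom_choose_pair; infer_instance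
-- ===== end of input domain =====

-- B replaces A's precomputed key intersection plus nested scan with a single-pass
-- dict comprehension filtering employees by membership in the combination set (objective: simpler).

-- ===== PORT A =====
-- employees (a Python dict) arrives as its items list, in insertion order.
def choose_pair (combination : List String) (employees : List (String × Int)) : List (String × Int) :=
  -- combination = set(combination)
  let combination' : PySem.Set String := PySem.Set.ofList combination
  -- new_employees = list(set(employees.keys()).intersection(combination))
  -- (its set-iteration order is irrelevant below: the inner loop only tests equality)
  let new_employees : PySem.Set String :=
    PySem.Set.inter (PySem.Set.ofList (employees.map Prod.fst)) combination'
  -- for i, j in employees.items(): for k in new_employees: if i == k: new_employees_dict[k] = j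
  let new_employees_dict : PySem.Dict String Int :=
    employees.foldl
      (fun d ij =>
        new_employees.foldl (fun d k => if ij.1 == k then d.insert k ij.2 else d) d)
      PySem.Dict.empty
  new_employees_dict.items

-- ===== PORT B =====
def choose_pair_alt (combination : List String) (employees : List (String × Int)) : List (String × Int) :=
  -- cset = set(combination)
  let cset : PySem.Set String := PySem.Set.ofList combination
  -- {k: v for k, v in employees.items() if k in cset}
  (employees.foldl
      (fun d kv => if cset.contains kv.1 then d.insert kv.1 kv.2 else d)
      PySem.Dict.empty).items

-- ===== PRECONDITION & SPEC =====
def Spec_choose_pair (combination : List String) (employees : List (String × Int)) (out : List (String × Int)) : Prop := out = choose_pair_alt combination employees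
instance (combination : List String) (employees : List (String × Int)) (out : List (String × Int)) : Decidable (Spec_choose_pair combination employees out) := by unfold Spec_choose_pair; infer_instance

-- ===== CLAIM (what is proved, stated in full; the proofs are below) =====
def Claim_equal_choose_pair : Prop := ∀ (combination : List String) (employees : List (String × Int)), Dom_choose_pair combination employees → Spec_choose_pair combination employees (choose_pair combination employees)

-- ===== LEMMAS AND PROOFS =====

-- A's inner loop over the (duplicate-free) set new_employees inserts i ↦ j exactly when i is in the set.
theorem inner_loop_eq {s : List String} (hnd : s.Nodup) (i : String) (j : Int)
    (d : PySem.Dict String Int) :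
    s.foldl (fun d k => if i == k then d.insert k j else d) d
      = if i ∈ s then d.insert i j else d := by
  induction s generalizing d with
  | nil => simp
  | cons a t ih =>
    simp only [List.foldl_cons, List.mem_cons]
    rcases List.nodup_cons.mp hnd with ⟨ha, hnt⟩
    by_cases h : i = a
    · subst h
      simp only [BEq.rfl, if_pos, ih hnt]
      simp [ha]
    · have hne : (i == a) = false := beq_eq_false_iff_ne.mpr h
      rw [hne]
      simp only [Bool.false_eq_true, if_false, ih hnt, h, false_or]

theorem choose_pair_spec : Claim_equal_choose_pair := by
  intro combination employees _
  unfold Spec_choose_pair choose_pair choose_pair_alt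
  simp only []
  congr 1
  apply PySem.List.foldl_congr_mem
  intro d ij hij
  rw [inner_loop_eq (PySem.Set.nodup_inter _ _ (PySem.Set.nodup_ofList (List.map Prod.fst employees)))]
  have hk : ij.1 ∈ employees.map Prod.fst := List.mem_map.mpr ⟨ij, hij, rfl⟩
  by_cases hc : ij.1 ∈ PySem.Set.ofList combination
  · rw [if_pos ((PySem.Set.mem_inter _ _ _).mpr ⟨(PySem.Set.mem_ofList _ _).mpr hk, hc⟩),
        if_pos ((PySem.Set.contains_iff _ _).mpr hc)]
  · rw [if_neg (fun h => hc ((PySem.Set.mem_inter _ _ _).mp h).2),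
        if_neg (fun h => hc ((PySem.Set.contains_iff _ _).mp h))]
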